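-- pv_equiv track=rewrite | github.com/Robert-Howell/AOC_2015 | Day1-9/day3.py | santa_robot_directions
-- ===== SOURCE A (Python) =====
-- move_dict = {"^": [-1, 0], "v": [1, 0], "<": [0, -1], ">": [0, 1]}
--
-- def santa_robot_directions(directions):
--     santa_current = [0, 0]
--     robot_current = [0, 0]
--     house_set = {(0, 0)}
--     count = 0
--     for char in directions:
--         move = move_dict[char]
--         if count % 2 == 0:
--             for i in range(2):
--                 santa_current[i] += move[i]
--             current_tup = tuple(santa_current)
--         else:
--             for i in range(2):
--                 robot_current[i] += move[i]
--             current_tup = tuple(robot_current)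
--
--         if current_tup not in house_set:
--             house_set.add(current_tup)
--
--         count += 1
--
--     return len(house_set)
-- ===== SOURCE B (Python) =====
-- move_dict = {"^": [-1, 0], "v": [1, 0], "<": [0, -1], ">": [0, 1]}
--
-- def santa_robot_directions(directions):
--     moves = [move_dict[c] for c in directions]
--     houses = {(0, 0)}
--     for lane in (moves[0::2], moves[1::2]):
--         r, c = 0, 0
--         for dr, dc in lane:
--             r += dr
--             c += dc
--             houses.add((r, c))
--     return len(houses)
-- ===== Notes on version B (the rewrite author's own statement) =====
-- stated objective: alternative
-- what changed: Instead of one interleaved loop with a parity counter and two mutable walkers, B maps all chars to moves, splits them into even/odd-index slices, and runs two independent cumulative walks that fill one shared set.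
import Mathlib
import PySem

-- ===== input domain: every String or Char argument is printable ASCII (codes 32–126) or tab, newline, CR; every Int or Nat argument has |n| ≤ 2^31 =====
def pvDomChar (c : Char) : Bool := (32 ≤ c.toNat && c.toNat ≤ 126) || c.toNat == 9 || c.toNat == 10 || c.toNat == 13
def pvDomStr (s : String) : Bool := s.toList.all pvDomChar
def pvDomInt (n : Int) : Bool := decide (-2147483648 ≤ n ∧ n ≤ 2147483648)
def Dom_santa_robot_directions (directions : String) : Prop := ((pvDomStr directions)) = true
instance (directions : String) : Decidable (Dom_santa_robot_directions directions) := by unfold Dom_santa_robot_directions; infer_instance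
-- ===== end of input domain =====

-- B replaces A's single interleaved loop (parity counter, two mutable walkers) by mapping the
-- chars to moves, splitting into even/odd-index slices and running two independent walks into
-- one shared set; return-value equivalence only (neither mutates its argument).

-- ===== PORT A =====
-- move_dict[c] (total under Pre_; on chars not in move_dict Python raises KeyError)
def moveOf (c : Char) : Int × Int :=
  if c = '^' then (-1, 0) else if c = 'v' then (1, 0)
  else if c = '<' then (0, -1) else (0, 1)

-- one iteration of A's for-loop: state (santa_current, robot_current, house_set, count)
def stepA (st : (Int × Int) × (Int × Int) × PySem.Set (Int × Int) × Nat) (c : Char) :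
    (Int × Int) × (Int × Int) × PySem.Set (Int × Int) × Nat :=
  let mv := moveOf c
  if st.2.2.2 % 2 = 0 then
    let q := (st.1.1 + mv.1, st.1.2 + mv.2)
    (q, st.2.1, PySem.Set.add st.2.2.1 q, st.2.2.2 + 1)
  else
    let q := (st.2.1.1 + mv.1, st.2.1.2 + mv.2)
    (st.1, q, PySem.Set.add st.2.2.1 q, st.2.2.2 + 1)

def santa_robot_directions (directions : String) : Int :=
  ((directions.toList.foldl stepA
      ((0, 0), (0, 0), PySem.Set.add PySem.Set.empty ((0, 0) : Int × Int), 0)).2.2.1.length : Int)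

-- ===== PORT B =====
-- xs[0::2] (every second element); xs[1::2] is everyOther xs.tail
def everyOther {α : Type} : List α → List α
  | [] => []
  | [x] => [x]
  | x :: _ :: xs => x :: everyOther xs

-- one step of a lane's walk: state (current position, shared house set)
def stepB (p : (Int × Int) × PySem.Set (Int × Int)) (mv : Int × Int) :
    (Int × Int) × PySem.Set (Int × Int) :=
  let q := (p.1.1 + mv.1, p.1.2 + mv.2)
  (q, PySem.Set.add p.2 q)

def santa_robot_directions_alt (directions : String) : Int :=
  let moves := directions.toList.map moveOf
  let h0 : PySem.Set (Int × Int) := PySem.Set.add PySem.Set.empty ((0, 0) : Int × Int)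
  let h1 := ((everyOther moves).foldl stepB (((0, 0) : Int × Int), h0)).2
  let h2 := ((everyOther moves.tail).foldl stepB (((0, 0) : Int × Int), h1)).2
  (h2.length : Int)

-- ===== PRECONDITION & SPEC =====
-- Pre_ excludes exactly the strings containing a character that is not a key of move_dict, on which A raises KeyError.
def Pre_santa_robot_directions (directions : String) : Prop :=
  (directions.toList.all fun c => c == '^' || c == 'v' || c == '<' || c == '>') = true
instance (directions : String) : Decidable (Pre_santa_robot_directions directions) := by
  unfold Pre_santa_robot_directions; infer_instance

def pvWitness_santa_robot_directions : String := "^v<>vv"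

def Spec_santa_robot_directions (directions : String) (out : Int) : Prop :=
  out = santa_robot_directions_alt directions
instance (directions : String) (out : Int) : Decidable (Spec_santa_robot_directions directions out) := by
  unfold Spec_santa_robot_directions; infer_instance

-- ===== CLAIM (what is proved, stated in full; the proofs are below) =====
def Claim_equal_santa_robot_directions : Prop :=
  ∀ (directions : String), Dom_santa_robot_directions directions →
    Pre_santa_robot_directions directions →
    Spec_santa_robot_directions directions (santa_robot_directions directions)

-- ===== LEMMAS AND PROOFS =====

-- positions visited when walking from p along ms
def visited : Int × Int → List (Int × Int) → List (Int × Int)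
  | _, [] => []
  | p, m :: ms => (p.1 + m.1, p.2 + m.2) :: visited (p.1 + m.1, p.2 + m.2) ms

theorem everyOther_cons {α : Type} (x : α) (L : List α) :
    everyOther (x :: L) = x :: everyOther L.tail := by
  cases L <;> rfl

theorem mem_foldB (ms : List (Int × Int)) :
    ∀ (p : Int × Int) (s : PySem.Set (Int × Int)) (y : Int × Int),
      (y ∈ (ms.foldl stepB (p, s)).2 ↔ y ∈ s ∨ y ∈ visited p ms) := by
  induction ms with
  | nil => intro p s y; simp [visited]
  | cons m ms ih =>
      intro p s y
      simp only [List.foldl_cons, stepB, visited, List.mem_cons]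
      rw [ih]
      simp [PySem.Set.mem_add]
      tauto

theorem nodup_foldB (ms : List (Int × Int)) :
    ∀ (p : Int × Int) (s : PySem.Set (Int × Int)), s.Nodup →
      ((ms.foldl stepB (p, s)).2).Nodup := by
  induction ms with
  | nil => intro p s hs; simpa using hs
  | cons m ms ih =>
      intro p s hs
      exact ih _ _ (PySem.Set.nodup_add _ _ hs)

theorem mem_foldA (l : List Char) :
    ∀ (a b : Int × Int) (s : PySem.Set (Int × Int)) (n : Nat) (y : Int × Int),
      (y ∈ (l.foldl stepA (a, b, s, n)).2.2.1 ↔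
        y ∈ s ∨ y ∈ visited (if n % 2 = 0 then a else b) (everyOther (l.map moveOf))
              ∨ y ∈ visited (if n % 2 = 0 then b else a) (everyOther (l.map moveOf).tail)) := by
  induction l with
  | nil => intro a b s n y; simp [everyOther, visited]
  | cons c l ih =>
      intro a b s n y
      simp only [List.foldl_cons, List.map_cons, everyOther_cons, List.tail_cons, stepA]
      by_cases hn : n % 2 = 0
      · rw [if_pos hn]
        rw [ih]
        have hn1 : (n + 1) % 2 ≠ 0 := by omega
        rw [if_neg hn1, if_neg hn1, if_pos hn, if_pos hn]
        simp only [visited, List.mem_cons, PySem.Set.mem_add]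
        tauto
      · rw [if_neg hn]
        rw [ih]
        have hn1 : (n + 1) % 2 = 0 := by omega
        rw [if_pos hn1, if_pos hn1, if_neg hn, if_neg hn]
        simp only [visited, List.mem_cons, PySem.Set.mem_add]
        tauto

theorem nodup_foldA (l : List Char) :
    ∀ (a b : Int × Int) (s : PySem.Set (Int × Int)) (n : Nat), s.Nodup →
      ((l.foldl stepA (a, b, s, n)).2.2.1).Nodup := by
  induction l with
  | nil => intro a b s n hs; simpa using hs
  | cons c l ih =>
      intro a b s n hs
      simp only [List.foldl_cons, stepA]
      by_cases hn : n % 2 = 0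
      · rw [if_pos hn]; exact ih _ _ _ _ (PySem.Set.nodup_add _ _ hs)
      · rw [if_neg hn]; exact ih _ _ _ _ (PySem.Set.nodup_add _ _ hs)

-- ===== VERDICT (by name: the statement is the Claim_ definition above) =====
theorem santa_robot_directions_spec : Claim_equal_santa_robot_directions := by
  intro d _ _
  unfold Spec_santa_robot_directions santa_robot_directions santa_robot_directions_alt
  have h0 : (PySem.Set.add PySem.Set.empty ((0, 0) : Int × Int)) = [((0, 0) : Int × Int)] := rfl
  set moves := d.toList.map moveOf with hm
  have hA := nodup_foldA d.toList (0, 0) (0, 0) [((0, 0) : Int × Int)] 0 (by simp)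
  have hB := nodup_foldB (everyOther moves.tail) (0, 0)
      ((everyOther moves).foldl stepB ((0, 0), [((0, 0) : Int × Int)])).2
      (nodup_foldB (everyOther moves) (0, 0) [((0, 0) : Int × Int)] (by simp))
  rw [h0]
  have hperm :
      ((d.toList.foldl stepA ((0, 0), (0, 0), [((0, 0) : Int × Int)], 0)).2.2.1).Perm
        (((everyOther moves.tail).foldl stepB
          ((0, 0), ((everyOther moves).foldl stepB ((0, 0), [((0, 0) : Int × Int)])).2)).2) := by
    rw [List.perm_ext_iff_of_nodup hA hB]
    intro y
    rw [mem_foldA, mem_foldB, mem_foldB]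
    simp only [← hm]
    tauto
  simp [hperm.length_eq]
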